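/- GENERATED by mk_final_copies.py from the proof of the farm's unit `vorbis_deinit.2` (farm:vorbis_deinit.2.1: Proof.lean) as the
   re-elaboration sweep compiled it — do not edit. -/
/-
  `vorbis_deinit.2` (CONTRACTS 13, segment 2: 0x107745 – 0x107900, stb_vorbis_fixed.c:4257 – 4275): the codebooks walk, `codebooks`,
  `floor_config`, `residue_config`, the mapping walk, `mapping`. From the assertion `vorbis_deinit.At` at `cut10` to the same
  assertion at `cut22`.

  THE PLAN. `At cut …` (Vorbis/Spec/Alloc.lean) is generic in the cut point, so it is used at EVERY cut of the segment (`cut11` …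
  `cut21` of Vorbis/Labels.lean: the loop heads, the back edges, the return points of the ten `setup_free` calls). Lemmas.lean
  proves one lemma per straight piece, `At cutA v → ReachVia v (At cutB ∨ …)`: the piece is walked from `v`, its check sites are
  closed by `chk_obj` / `chk_codebook` / `chk_mapping` (OB1, H4, H5 of `DeinitOK` in the present memory), the call of
  `setup_free` by `pre_free`, and the assertion is moved to the piece's last state by `at_move` (nothing was stored but below the
  five saved registers). Inside the loops the assertion is `AtLoopHead` (+ the counter `i` in r12) or `AtIn` (+ `i` below the count
  field, the element's address in rbp). This file chains the pieces: the two loops by `ReachVia.loop` on the measure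
  `count − r12` (the count field is read in the ENTRY memory: H6 keeps it), then the whole segment.
-/
import Asan.CheckWalk
import Vorbis.Spec.Units.vorbis_deinit_2
import Vorbis.Spec.Worked.vorbis_deinit_2_Lemmas

open X86 X86.User Asan Vorbis Vorbis.Spec

set_option maxRecDepth 4000
set_option maxHeartbeats 4000000

namespace Vorbis.Spec.vorbis_deinit_2

variable {others : List Obj} {frames : List (Nat × FrameLayout)} {Blk : Block → Prop} {u₀ e : State} {ret : Word}
  {Lay : Layout} {μ : Microarch}

/-- **The codebooks loop** (head `cut12` = 0x107773, stb_vorbis_fixed.c:4259 `for (i=0; i < p->codebook_count; ++i)`): from the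
head with any counter to `cut17`, the return point of `setup_free(p, p->codebooks)` after the loop. Invariant: `AtLoopHead … i`;
measure: `codebook_count − r12`. -/
theorem loop_codebooks (H : D2Hyp Lay μ u₀) (hnz : stb_vorbis.codebooks e.mem (e.reg .rdi).toNat ≠ 0) :
    ∀ v, (∃ i, AtLoopHead Vorbis.L.vorbis_deinit.cut12 others frames Blk u₀ e ret i v) →
      ReachVia Lay μ WayInv v (vorbis_deinit.At Vorbis.L.vorbis_deinit.cut17 others frames Blk u₀ e ret) := by
  apply ReachVia.loop
    (fun v => (stb_vorbis.codebook_count e.mem (e.reg .rdi).toNat - ((v.reg .r12).toNat : Int)).toNat)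
  intro v hinv
  obtain ⟨i, hin⟩ := hinv
  -- 0x107773: the head; the exit arm ends at `cut17`, the body arm at `cut13`
  refine (piece_cut12 H hnz hin).trans ?_
  intro r1 h1
  rcases h1 with h17 | h13
  · exact ReachVia.done (Or.inl h17)
  · -- 0x1077be, 0x1077d3, 0x1077e8, 0x107803: the four other pointers of `codebooks[i]`
    refine (piece_cut13 H hnz h13).trans ?_
    intro r2 h14
    refine (piece_cut14 H hnz h14).trans ?_
    intro r3 h15
    refine (piece_cut15 H hnz h15).trans ?_
    intro r4 h16
    refine (piece_cut16 H hnz h16).trans ?_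
    intro r5 h11
    -- 0x10776f: the back edge
    refine (piece_cut11 H hnz h11).mono ?_
    intro r6 h12
    refine Or.inr ⟨⟨i + 1, h12⟩, ?_⟩
    have e6 := h12.r12
    have e0 := hin.r12
    have hlt := h11.lt
    show (stb_vorbis.codebook_count e.mem (e.reg .rdi).toNat - ((r6.reg .r12).toNat : Int)).toNat <
      (stb_vorbis.codebook_count e.mem (e.reg .rdi).toNat - ((v.reg .r12).toNat : Int)).toNat
    omega

/-- **The mapping loop** (head `cut21` = 0x1078d5, stb_vorbis_fixed.c:4273 `for (i=0; i < p->mapping_count; ++i)`): from the head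
with any counter to `cut22`, the return point of `setup_free(p, p->mapping)` after the loop — the end of the segment.
Invariant: `AtLoopHead … i`; measure: `mapping_count − r12`. -/
theorem loop_mapping (H : D2Hyp Lay μ u₀) (hnz : stb_vorbis.mapping e.mem (e.reg .rdi).toNat ≠ 0) :
    ∀ v, (∃ i, AtLoopHead Vorbis.L.vorbis_deinit.cut21 others frames Blk u₀ e ret i v) →
      ReachVia Lay μ WayInv v (vorbis_deinit.At Vorbis.L.vorbis_deinit.cut22 others frames Blk u₀ e ret) := by
  apply ReachVia.loop
    (fun v => (stb_vorbis.mapping_count e.mem (e.reg .rdi).toNat - ((v.reg .r12).toNat : Int)).toNat)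
  intro v hinv
  obtain ⟨i, hin⟩ := hinv
  -- 0x1078d5: the head; the exit arm ends at `cut22`, the body arm at `cut20`
  refine (piece_cut21 H hnz hin).trans ?_
  intro r1 h1
  rcases h1 with h22 | h20
  · exact ReachVia.done (Or.inl h22)
  · -- 0x1078d1: the back edge
    refine (piece_cut20 H hnz h20).mono ?_
    intro r2 h21
    refine Or.inr ⟨⟨i + 1, h21⟩, ?_⟩
    have e2 := h21.r12
    have e0 := hin.r12
    have hlt := h20.lt
    show (stb_vorbis.mapping_count e.mem (e.reg .rdi).toNat - ((r2.reg .r12).toNat : Int)).toNat <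
      (stb_vorbis.mapping_count e.mem (e.reg .rdi).toNat - ((v.reg .r12).toNat : Int)).toNat
    omega

/-- **After the codebooks** (`cut17` = 0x107843 … `cut22` = 0x107905, stb_vorbis_fixed.c:4270 – 4275): `floor_config`,
`residue_config`, the NULL test of `mapping`, the mapping loop. -/
theorem after_codebooks (H : D2Hyp Lay μ u₀) (v : State)
    (h17 : vorbis_deinit.At Vorbis.L.vorbis_deinit.cut17 others frames Blk u₀ e ret v) :
    ReachVia Lay μ WayInv v (vorbis_deinit.At Vorbis.L.vorbis_deinit.cut22 others frames Blk u₀ e ret) := by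
  refine (piece_cut17 H h17).trans ?_
  intro r1 h18
  refine (piece_cut18 H h18).trans ?_
  intro r2 h19
  refine (piece_cut19 H h19).trans ?_
  intro r3 h
  rcases h with h22 | ⟨hnz, hhead⟩
  · exact ReachVia.done h22
  · exact loop_mapping H hnz r3 ⟨0, hhead⟩

end Vorbis.Spec.vorbis_deinit_2

/-- Segment 2 of `vorbis_deinit` (`cut10` = 0x107745 … `cut22` = 0x107905): the NULL test of `codebooks`, the codebooks loop,
then `after_codebooks`. -/
theorem Vorbis.Spec.Worked.vorbis_deinit_2_ok : Vorbis.Spec.vorbis_deinit_2.Statement := by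
  intro Lay hLay μ hμ u₀ hcode h8 hsf h4 others frames Blk e ret v hat
  have H : Vorbis.Spec.vorbis_deinit_2.D2Hyp Lay μ u₀ := ⟨hLay, hμ, hcode, h8, hsf, h4⟩
  -- 0x107745: `if (p->codebooks)`
  refine (Vorbis.Spec.vorbis_deinit_2.piece_cut10 H hat).trans ?_
  intro r h
  rcases h with h17 | ⟨hnz, hhead⟩
  · exact Vorbis.Spec.vorbis_deinit_2.after_codebooks H r h17
  · exact (Vorbis.Spec.vorbis_deinit_2.loop_codebooks H hnz r ⟨0, hhead⟩).trans
      (Vorbis.Spec.vorbis_deinit_2.after_codebooks H)
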